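-- pv_equiv track=rewrite | github.com/AlexKjes/connect-4 | c4_game.py | calculate_reward_vector
-- ===== SOURCE A (Python) =====
-- def calculate_reward_vector(board_vector):
--     total_in_row = [[0, 0, 0, 0], [0, 0, 0, 0]]
--     in_row = [0, 0]
--     for i in range(0, len(board_vector)):
--         if board_vector[i] != 0:
--             if board_vector[i] == in_row[0]:
--                 in_row[1] += 1
--             else:
--                 if in_row[0] != 0:
--                     total_in_row[in_row[0]-1][in_row[1]-1] += 1
--                 in_row = [board_vector[i], 1]
--         elif in_row[0] != 0:
--             total_in_row[in_row[0]-1][in_row[1]-1] += 1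
--             in_row = [0, 0]
--     if in_row[0] != 0:
--         total_in_row[in_row[0]-1][in_row[1]-1] += 1
--
--     return total_in_row
-- ===== SOURCE B (Python) =====
-- def calculate_reward_vector(board_vector):
--     total_in_row = [[0, 0, 0, 0], [0, 0, 0, 0]]
--     i, n = 0, len(board_vector)
--     while i < n:
--         j = i + 1
--         while j < n and board_vector[j] == board_vector[i]:
--             j += 1
--         if board_vector[i] != 0:
--             total_in_row[board_vector[i] - 1][j - i - 1] += 1
--         i = j
--     return total_in_row
-- ===== Notes on version B (the rewrite author's own statement) =====
-- stated objective: simpler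
-- what changed: Replaced the element-at-a-time in_row state machine with its deferred post-loop flush by a two-pointer scan that finds each maximal run directly and tallies it in one place, eliminating the carried state and the duplicated flush code.
import Mathlib
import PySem

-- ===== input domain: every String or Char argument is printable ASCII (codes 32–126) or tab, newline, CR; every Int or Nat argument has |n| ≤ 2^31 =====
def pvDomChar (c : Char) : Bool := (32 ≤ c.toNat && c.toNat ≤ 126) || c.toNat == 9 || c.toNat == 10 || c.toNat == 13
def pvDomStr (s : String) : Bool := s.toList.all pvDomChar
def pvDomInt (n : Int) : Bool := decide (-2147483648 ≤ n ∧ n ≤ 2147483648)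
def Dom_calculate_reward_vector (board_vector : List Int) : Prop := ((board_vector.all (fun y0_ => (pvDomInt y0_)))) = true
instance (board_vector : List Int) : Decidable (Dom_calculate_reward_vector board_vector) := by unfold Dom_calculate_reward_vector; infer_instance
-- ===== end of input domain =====

-- B replaces A's carried in_row state machine (with its duplicated post-loop flush)
-- by a two-pointer scan over maximal runs, tallying each run in one place (simpler).


-- ===== PORT A =====
-- Python's xs[i] with a possibly negative index, for in-place +=1 updates:
-- exact where Python's indexing succeeds; out of range Python raises (excluded by Pre_)
def pyModify (xs : List Int) (i : Int) (f : Int → Int) : List Int :=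
  let j := if i < 0 then i + xs.length else i
  if 0 ≤ j ∧ j < xs.length then xs.modify j.toNat f else xs

def pyModifyRow (xs : List (List Int)) (i : Int) (f : List Int → List Int) : List (List Int) :=
  let j := if i < 0 then i + xs.length else i
  if 0 ≤ j ∧ j < xs.length then xs.modify j.toNat f else xs

-- total_in_row[v-1][c-1] += 1  (identical line in both Pythons)
def bump (t : List (List Int)) (v c : Int) : List (List Int) :=
  pyModifyRow t (v - 1) (fun row => pyModify row (c - 1) (· + 1))

-- the loop body of A, state = (total_in_row, in_row[0], in_row[1])
def aStep (st : List (List Int) × Int × Int) (x : Int) : List (List Int) × Int × Int :=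
  let (total, v, c) := st
  if x ≠ 0 then
    if x = v then (total, v, c + 1)
    else if v ≠ 0 then (bump total v c, x, 1)
    else (total, x, 1)
  else if v ≠ 0 then (bump total v c, 0, 0)
  else (total, v, c)

-- the post-loop flush of A
def finish (st : List (List Int) × Int × Int) : List (List Int) :=
  if st.2.1 ≠ 0 then bump st.1 st.2.1 st.2.2 else st.1

def calculate_reward_vector (board_vector : List Int) : List (List Int) :=
  finish (board_vector.foldl aStep ([[0, 0, 0, 0], [0, 0, 0, 0]], 0, 0))

-- ===== PORT B =====
-- inner while of B: count the leading elements equal to x, return (count, remaining suffix)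
def countRun (x : Int) : List Int → Int × List Int
  | [] => (0, [])
  | y :: ys => if y = x then let (n, r) := countRun x ys; (n + 1, r) else (0, y :: ys)

theorem countRun_len (x : Int) (l : List Int) : (countRun x l).2.length ≤ l.length := by
  induction l with
  | nil => simp [countRun]
  | cons y ys ih =>
    simp only [countRun]
    split
    · simpa using Nat.le_succ_of_le ih
    · simp

-- outer while of B: one maximal run per iteration
def runLoop (total : List (List Int)) : List Int → List (List Int)
  | [] => total
  | x :: rest =>
    runLoop (if x ≠ 0 then bump total x ((countRun x rest).1 + 1) else total) (countRun x rest).2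
  termination_by l => l.length
  decreasing_by exact Nat.lt_succ_of_le (countRun_len x rest)

def calculate_reward_vector_alt (board_vector : List Int) : List (List Int) :=
  runLoop [[0, 0, 0, 0], [0, 0, 0, 0]] board_vector

-- ===== PRECONDITION & SPEC =====
-- Exactly the inputs on which A returns (no IndexError): every element is in {-1,0,1,2}
-- and no run of equal nonzero elements is longer than 4.
def Pre_calculate_reward_vector (board_vector : List Int) : Prop :=
  (∀ x ∈ board_vector, x = -1 ∨ x = 0 ∨ x = 1 ∨ x = 2) ∧
  (∀ i ∈ List.range board_vector.length, i + 4 < board_vector.length →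
    ¬ (board_vector.getD i 0 ≠ 0 ∧
       board_vector.getD (i+1) 0 = board_vector.getD i 0 ∧
       board_vector.getD (i+2) 0 = board_vector.getD i 0 ∧
       board_vector.getD (i+3) 0 = board_vector.getD i 0 ∧
       board_vector.getD (i+4) 0 = board_vector.getD i 0))
instance (board_vector : List Int) : Decidable (Pre_calculate_reward_vector board_vector) := by
  unfold Pre_calculate_reward_vector; infer_instance

def pvWitness_calculate_reward_vector : List Int := [1, 1, 0, 2, 2, 2, -1]

def Spec_calculate_reward_vector (board_vector : List Int) (out : List (List Int)) : Prop := out = calculate_reward_vector_alt board_vector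
instance (board_vector : List Int) (out : List (List Int)) : Decidable (Spec_calculate_reward_vector board_vector out) := by unfold Spec_calculate_reward_vector; infer_instance

-- ===== CLAIM (what is proved, stated in full; the proofs are below) =====
def Claim_equal_calculate_reward_vector : Prop := ∀ (board_vector : List Int), Dom_calculate_reward_vector board_vector → Pre_calculate_reward_vector board_vector → Spec_calculate_reward_vector board_vector (calculate_reward_vector board_vector)

-- ===== LEMMAS AND PROOFS =====

-- skipping a run of zeros from the idle state leaves A's fold state unchanged
theorem fold_skip_zeros (l : List Int) (total : List (List Int)) :
    l.foldl aStep (total, 0, 0) = (countRun 0 l).2.foldl aStep (total, 0, 0) := by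
  induction l with
  | nil => rfl
  | cons y ys ih =>
    by_cases hy : y = 0
    · subst hy
      simpa [countRun, aStep] using ih
    · simp [countRun, hy]

-- inside a run of value v, A keeps counting until the run ends, then flushes bump total v (c+n)
theorem fold_in_run (l : List Int) (v : Int) (hv : v ≠ 0) :
    ∀ (c : Int) (total : List (List Int)),
      finish (l.foldl aStep (total, v, c)) =
      finish ((countRun v l).2.foldl aStep (bump total v (c + (countRun v l).1), 0, 0)) := by
  induction l with
  | nil => intro c total; simp [countRun, finish, hv]
  | cons y ys ih =>
    intro c total
    by_cases hyv : y = v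
    · subst hyv
      have h1 : (c + 1) + (countRun y ys).1 = c + ((countRun y ys).1 + 1) := by ring
      simpa [countRun, aStep, hv, h1] using ih (c + 1) total
    · by_cases hy : y = 0
      · subst hy
        simp [countRun, aStep, hv, if_neg hyv]
      · simp [countRun, aStep, hv, hy, hyv]

-- main loop correspondence, by strong induction on the length of the suffix
theorem fold_eq_runLoop : ∀ (n : Nat) (l : List Int), l.length ≤ n →
    ∀ (total : List (List Int)), finish (l.foldl aStep (total, 0, 0)) = runLoop total l := by
  intro n
  induction n with
  | zero =>
    intro l hl total
    have : l = [] := List.eq_nil_of_length_eq_zero (Nat.le_zero.mp hl)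
    subst this; simp [runLoop, finish]
  | succ n ih =>
    intro l hl total
    match l with
    | [] => simp [runLoop, finish]
    | x :: rest =>
      by_cases hx : x = 0
      · subst hx
        have h1 : (List.foldl aStep (total, 0, 0) rest) =
            (countRun 0 rest).2.foldl aStep (total, 0, 0) := fold_skip_zeros rest total
        have hlen : (countRun 0 rest).2.length ≤ n :=
          le_trans (countRun_len 0 rest) (Nat.le_of_succ_le_succ hl)
        have hs : aStep (total, 0, 0) 0 = (total, 0, 0) := by simp [aStep]
        have hr : runLoop total ((0 : Int) :: rest) = runLoop total (countRun 0 rest).2 := by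
          rw [runLoop]; simp
        rw [List.foldl_cons, hs, h1, hr]
        exact ih _ hlen total
      · have h1 := fold_in_run rest x hx 1 total
        have hlen : (countRun x rest).2.length ≤ n :=
          le_trans (countRun_len x rest) (Nat.le_of_succ_le_succ hl)
        have h2 : (1 : Int) + (countRun x rest).1 = (countRun x rest).1 + 1 := by ring
        have hs : aStep (total, 0, 0) x = (total, x, 1) := by simp [aStep, hx]
        have hr : runLoop total (x :: rest) =
            runLoop (bump total x ((countRun x rest).1 + 1)) (countRun x rest).2 := by
          rw [runLoop]; simp [hx]
        rw [List.foldl_cons, hs, h1, h2, hr]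
        exact ih _ hlen _
  
-- ===== VERDICT (by name: the statement is the Claim_ definition above) =====
theorem calculate_reward_vector_spec : Claim_equal_calculate_reward_vector := by
  intro bv _ _
  unfold Spec_calculate_reward_vector calculate_reward_vector calculate_reward_vector_alt
  exact fold_eq_runLoop bv.length bv (le_refl _) _
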